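-- pv_equiv track=rewrite | github.com/lamhai1401/dp-py | devideconquer/sort.py | minimum_number_of_platforms
-- ===== SOURCE A (Python) =====
-- from typing import Dict, List
--
-- def minimum_number_of_platforms(arrival: List, deps: List, n):
--     arrival = sorted(arrival)
--     deps = sorted(deps)
--
--     arr: List = [()] * n
--
--     # save each pair start/stop
--     for i in range(0, n,1):
--         arr[i] = (arrival[i], deps[i])
--
--
--     result: List = []
--     check: Dict = {}
--
--     for i in range(0, n, 1):
--         # checked duplicated
--         if check.get(i, False):
--             continue
--         check[i] = True
--         data: List = [arr[i]]
--         last = arr[i] # save last data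
--         for j in range(i+1, n, 1):
--             if check.get(j, False):
--                 continue
--             if last[1] < arr[j][0]:
--                 data.append(arr[j])
--                 check[j] = True
--                 last = arr[j]
--         result.append(data)
--     return len(result)
-- ===== SOURCE B (Python) =====
-- def minimum_number_of_platforms(arrival, deps, n):
--     if n <= 0:
--         return 0
--     a = sorted(arrival)[:n]
--     d = sorted(deps)[:n]
--     m = 0  # number of departures greedily matched to a later arrival
--     for i in range(n):
--         if m < i and d[m] < a[i]:
--             m += 1
--     return n - m
-- ===== Notes on version B (the rewrite author's own statement) =====
-- stated objective: faster
-- what changed: Replaces A's quadratic chain-by-chain greedy (nested scans over a visited-dict) by a single two-pointer pass over the two sorted arrays that greedily matches each departure to the next later arrival; the answer is n minus the number of matches.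
import Mathlib
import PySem

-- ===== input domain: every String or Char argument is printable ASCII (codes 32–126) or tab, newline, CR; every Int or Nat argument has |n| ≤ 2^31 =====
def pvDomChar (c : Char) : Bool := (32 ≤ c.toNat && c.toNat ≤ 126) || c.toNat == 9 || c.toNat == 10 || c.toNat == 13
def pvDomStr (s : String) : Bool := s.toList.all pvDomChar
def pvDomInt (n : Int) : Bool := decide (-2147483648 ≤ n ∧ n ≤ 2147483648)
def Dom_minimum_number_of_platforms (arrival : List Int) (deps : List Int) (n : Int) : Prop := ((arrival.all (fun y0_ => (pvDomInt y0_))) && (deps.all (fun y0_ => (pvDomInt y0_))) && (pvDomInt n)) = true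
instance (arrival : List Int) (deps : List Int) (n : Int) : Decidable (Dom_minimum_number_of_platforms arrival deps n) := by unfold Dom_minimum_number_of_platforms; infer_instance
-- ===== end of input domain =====

-- B replaces A's quadratic chain-by-chain greedy with one two-pointer pass over the two
-- sorted arrays (n minus the number of departure→later-arrival matches); asymptotically faster.

-- ===== PORT A =====
-- Literal port of A: sort both lists, pair up the first n entries, then the nested greedy
-- with a 'check' dict marking used indices; returns len(result).
-- (arr = [()]*n then 'for i in range(n): arr[i] = (arrival[i], deps[i])' fills every slot of
-- range(n); the port builds the same pair list over the same range. arrival[i]/deps[i] raise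
-- IndexError when 0 < n exceeds a length — those inputs are excluded by Pre_, so pyGetD's
-- default is never read on admitted inputs.)
def minimum_number_of_platforms (arrival : List Int) (deps : List Int) (n : Int) : Int :=
  let arrival' := PySem.List.sorted arrival (fun x => x) false
  let deps' := PySem.List.sorted deps (fun x => x) false
  let arr : List (Int × Int) := (PySem.List.pyRange 0 n).map
      (fun i => (PySem.List.pyGetD arrival' i 0, PySem.List.pyGetD deps' i 0))
  let st := (PySem.List.pyRange 0 n).foldl
    (fun (st : PySem.Dict Int Bool × List (List (Int × Int))) i =>
      if st.1.getD i false then st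
      else
        let check1 := st.1.insert i true
        let p := PySem.List.pyGetD arr i (0, 0)
        let inner := (PySem.List.pyRange (i+1) n).foldl
          (fun (s : PySem.Dict Int Bool × List (Int × Int) × (Int × Int)) j =>
            if s.1.getD j false then s
            else if s.2.2.2 < (PySem.List.pyGetD arr j (0, 0)).1 then
              (s.1.insert j true, s.2.1 ++ [PySem.List.pyGetD arr j (0, 0)],
               PySem.List.pyGetD arr j (0, 0))
            else s)
          (check1, [p], p)
        (inner.1, st.2 ++ [inner.2.1]))
    (PySem.Dict.empty, [])
  (st.2.length : Int)

-- ===== PORT B =====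
-- Literal port of Source B: sort, slice to the first n, one pass with match counter m.
def minimum_number_of_platforms_alt (arrival : List Int) (deps : List Int) (n : Int) : Int :=
  if n ≤ 0 then 0
  else
    let a := PySem.List.slice (PySem.List.sorted arrival (fun x => x) false) none (some n)
    let d := PySem.List.slice (PySem.List.sorted deps (fun x => x) false) none (some n)
    let m := (PySem.List.pyRange 0 n).foldl
      (fun (m : Int) i =>
        if m < i ∧ PySem.List.pyGetD d m 0 < PySem.List.pyGetD a i 0 then m + 1 else m) 0
    n - m

-- ===== PRECONDITION & SPEC =====
-- Pre_ excludes exactly the inputs where A raises IndexError (arrival[i] / deps[i] with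
-- 0 < n larger than a list's length); for n ≤ 0 A indexes nothing and returns 0, so those
-- inputs stay inside.
def Pre_minimum_number_of_platforms (arrival : List Int) (deps : List Int) (n : Int) : Prop :=
  n ≤ 0 ∨ (n ≤ (arrival.length : Int) ∧ n ≤ (deps.length : Int))
instance (arrival : List Int) (deps : List Int) (n : Int) : Decidable (Pre_minimum_number_of_platforms arrival deps n) := by unfold Pre_minimum_number_of_platforms; infer_instance

def pvWitness_minimum_number_of_platforms : List Int × List Int × Int :=
  ([900, 940, 950, 1100, 1500, 1800], [910, 1200, 1120, 1130, 1900, 2000], 6)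

def Spec_minimum_number_of_platforms (arrival : List Int) (deps : List Int) (n : Int) (out : Int) : Prop := out = minimum_number_of_platforms_alt arrival deps n
instance (arrival : List Int) (deps : List Int) (n : Int) (out : Int) : Decidable (Spec_minimum_number_of_platforms arrival deps n out) := by unfold Spec_minimum_number_of_platforms; infer_instance

-- ===== CLAIM (what is proved, stated in full; the proofs are below) =====
def Claim_equal_minimum_number_of_platforms : Prop := ∀ (arrival : List Int) (deps : List Int) (n : Int), Dom_minimum_number_of_platforms arrival deps n → Pre_minimum_number_of_platforms arrival deps n → Spec_minimum_number_of_platforms arrival deps n (minimum_number_of_platforms arrival deps n)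

-- ===== LEMMAS AND PROOFS =====

-- ---------- A-model: chain-at-a-time greedy on a list of (arrival, departure) pairs ----------
-- pvSkim x l = the pairs of l NOT absorbed into a chain whose current last departure is x;
-- pvChains counts the chains the greedy builds.
def pvSkim (x : Int) : List (Int × Int) → List (Int × Int)
  | [] => []
  | p :: l => if x < p.1 then pvSkim p.2 l else p :: pvSkim x l

theorem pvSkim_length_le (x : Int) (l : List (Int × Int)) : (pvSkim x l).length ≤ l.length := by
  induction l generalizing x with
  | nil => simp [pvSkim]
  | cons p l ih =>
    simp only [pvSkim]; split
    · exact le_trans (ih _) (Nat.le_succ _)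
    · simpa using ih _

def pvChains : List (Int × Int) → Nat
  | [] => 0
  | p :: rest => 1 + pvChains (pvSkim p.2 rest)
termination_by l => l.length
decreasing_by simpa using Nat.lt_succ_of_le (pvSkim_length_le _ _)

-- ---------- first-fit model: the list of chain-last departures in creation order ----------
def pvFfIns (a d : Int) : List Int → List Int
  | [] => [d]
  | x :: s => if x < a then d :: s else x :: pvFfIns a d s

def pvFf (lasts : List Int) (l : List (Int × Int)) : List Int :=
  l.foldl (fun s p => pvFfIns p.1 p.2 s) lasts

def pvChLast (x : Int) : List (Int × Int) → Int
  | [] => x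
  | p :: l => if x < p.1 then pvChLast p.2 l else pvChLast x l

-- chain-at-a-time = first-fit: the first chain's final last is the head of the state
theorem pvFf_cons (l : List (Int × Int)) : ∀ (x : Int) (S : List Int),
    pvFf (x :: S) l = pvChLast x l :: pvFf S (pvSkim x l) := by
  induction l with
  | nil => intro x S; rfl
  | cons p l ih =>
    intro x S
    by_cases h : x < p.1
    · simp only [pvFf, List.foldl_cons, pvFfIns, if_pos h, pvChLast, pvSkim]
      exact ih p.2 S
    · simp only [pvFf, List.foldl_cons, pvFfIns, if_neg h, pvChLast, pvSkim]
      exact ih x (pvFfIns p.1 p.2 S)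

theorem pvChains_eq_ff (l : List (Int × Int)) : pvChains l = (pvFf [] l).length := by
  induction hn : l.length using Nat.strong_induction_on generalizing l with
  | _ n ih =>
  match l with
  | [] => simp [pvChains, pvFf]
  | p :: rest =>
    have : pvFf [] (p :: rest) = pvChLast p.2 rest :: pvFf [] (pvSkim p.2 rest) := by
      simp only [pvFf, List.foldl_cons, pvFfIns]
      exact pvFf_cons rest p.2 []
    rw [pvChains, this, List.length_cons]
    have hlt : (pvSkim p.2 rest).length < n := by
      subst hn; simpa using Nat.lt_succ_of_le (pvSkim_length_le _ _)
    rw [ih _ hlt _ rfl]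
    omega

-- ---------- B-model: FIFO queue of the not-yet-matched departures ----------
def pvBqStep (w : List Int) (p : Int × Int) : List Int :=
  match w with
  | [] => [p.2]
  | h :: t => if h < p.1 then t ++ [p.2] else (h :: t) ++ [p.2]

def pvBq (w : List Int) (l : List (Int × Int)) : List Int := l.foldl pvBqStep w

-- ---------- first-fit = queue model (the heart of the equivalence) ----------
theorem pvFfIns_no (a d : Int) (S : List Int) (h : ∀ x ∈ S, ¬ x < a) :
    pvFfIns a d S = S ++ [d] := by
  induction S with
  | nil => rfl
  | cons x s ih =>
    simp only [pvFfIns, if_neg (h x (by simp))]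
    simp only [List.cons_append, List.cons.injEq, true_and]
    exact ih (fun y hy => h y (by simp [hy]))

theorem pvFfIns_len (a d : Int) (S : List Int) (h : ∃ x ∈ S, x < a) :
    (pvFfIns a d S).length = S.length := by
  induction S with
  | nil => simp at h
  | cons x s ih =>
    simp only [pvFfIns]
    split
    · simp
    · next hx =>
      have : ∃ y ∈ s, y < a := by
        obtain ⟨y, hy, hya⟩ := h
        rcases List.mem_cons.1 hy with rfl | hy'
        · exact absurd hya hx
        · exact ⟨y, hy', hya⟩
      simp [ih this]

theorem pvFfIns_countP (a d : Int) (S : List Int) (h : ∃ x ∈ S, x < a)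
    (t : Int) (ht : a ≤ t) :
    (pvFfIns a d S).countP (fun x => decide (t ≤ x)) =
      S.countP (fun x => decide (t ≤ x)) + (if t ≤ d then 1 else 0) := by
  induction S with
  | nil => simp at h
  | cons x s ih =>
    simp only [pvFfIns]
    split
    · next hx =>
      have hxt : ¬ t ≤ x := by omega
      simp only [List.countP_cons, decide_eq_true_eq]
      rw [if_neg hxt]
      split <;> omega
    · next hx =>
      have : ∃ y ∈ s, y < a := by
        obtain ⟨y, hy, hya⟩ := h
        rcases List.mem_cons.1 hy with rfl | hy'
        · exact absurd hya hx
        · exact ⟨y, hy', hya⟩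
      simp only [List.countP_cons, ih this]
      omega

-- Invariant: the first-fit state S and the queue W have the same length and, above any
-- threshold t that can still occur as an arrival, the same number of departures ≥ t.
theorem pvFfBq (l : List (Int × Int)) : ∀ (S W : List Int) (lb : Int),
    (l.map Prod.fst).Pairwise (· ≤ ·) →
    (∀ p ∈ l, lb ≤ p.1) →
    (l.map Prod.snd).Pairwise (· ≤ ·) →
    (∀ y ∈ W, ∀ p ∈ l, y ≤ p.2) →
    W.Pairwise (· ≤ ·) →
    S.length = W.length →
    (∀ t, lb ≤ t → S.countP (fun x => decide (t ≤ x)) = W.countP (fun x => decide (t ≤ x))) →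
    (pvFf S l).length = (pvBq W l).length := by
  induction l with
  | nil => intro S W lb _ _ _ _ _ hlen _; simpa [pvFf, pvBq] using hlen
  | cons p rest ih =>
    intro S W lb hfst hlb hsnd hWd hWs hlen hcnt
    have hlbp : lb ≤ p.1 := hlb p (by simp)
    have hkey : (∃ x ∈ S, x < p.1) ↔ (∃ y ∈ W, y < p.1) := by
      have h1 := hcnt p.1 hlbp
      have hS := List.countP_lt_length_iff (l := S) (p := fun x => decide (p.1 ≤ x))
      have hW := List.countP_lt_length_iff (l := W) (p := fun x => decide (p.1 ≤ x))
      have eS : (∃ x ∈ S, x < p.1) ↔ S.countP (fun x => decide (p.1 ≤ x)) < S.length := by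
        rw [hS]
        constructor
        · rintro ⟨x, hx, hlt⟩; exact ⟨x, hx, by simp; omega⟩
        · rintro ⟨x, hx, hlt⟩; simp at hlt; exact ⟨x, hx, by omega⟩
      have eW : (∃ y ∈ W, y < p.1) ↔ W.countP (fun x => decide (p.1 ≤ x)) < W.length := by
        rw [hW]
        constructor
        · rintro ⟨x, hx, hlt⟩; exact ⟨x, hx, by simp; omega⟩
        · rintro ⟨x, hx, hlt⟩; simp at hlt; exact ⟨x, hx, by omega⟩
      rw [eS, eW, h1, hlen]
    have hfst' : (rest.map Prod.fst).Pairwise (· ≤ ·) := (List.pairwise_cons.1 hfst).2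
    have hlb' : ∀ q ∈ rest, p.1 ≤ q.1 := by
      intro q hq
      exact (List.pairwise_cons.1 hfst).1 q.1 (List.mem_map_of_mem hq)
    have hsnd' : (rest.map Prod.snd).Pairwise (· ≤ ·) := (List.pairwise_cons.1 hsnd).2
    have hd2 : ∀ q ∈ rest, p.2 ≤ q.2 := by
      intro q hq
      exact (List.pairwise_cons.1 hsnd).1 q.2 (List.mem_map_of_mem hq)
    by_cases hex : ∃ x ∈ S, x < p.1
    · -- both can place p: first-fit replaces its first last < p.1, the queue pops its head
      have hexW := hkey.1 hex
      obtain ⟨y0, hy0W, hy0⟩ := hexW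
      obtain ⟨h, t', rfl⟩ : ∃ h t', W = h :: t' := by
        cases W with
        | nil => simp at hy0W
        | cons h t' => exact ⟨h, t', rfl⟩
      have hh : h < p.1 := by
        rcases List.mem_cons.1 hy0W with rfl | hy'
        · exact hy0
        · exact lt_of_le_of_lt (List.rel_of_pairwise_cons hWs hy') hy0
      have hbq : pvBq (h :: t') (p :: rest) = pvBq (t' ++ [p.2]) rest := by
        simp [pvBq, pvBqStep, if_pos hh]
      have hff : pvFf S (p :: rest) = pvFf (pvFfIns p.1 p.2 S) rest := rfl
      rw [hbq, hff]
      refine ih (pvFfIns p.1 p.2 S) (t' ++ [p.2]) p.1 hfst' hlb' hsnd' ?_ ?_ ?_ ?_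
      · intro y hy q hq
        rcases List.mem_append.1 hy with hy' | hy'
        · exact hWd y (by simp [hy']) q (by simp [hq])
        · simp at hy'; subst hy'; exact hd2 q hq
      · rcases List.pairwise_cons.1 hWs with ⟨hhle, ht'⟩
        apply List.pairwise_append.2
        refine ⟨ht', by simp, ?_⟩
        intro y hy z hz
        simp at hz; subst hz
        exact hWd y (by simp [hy]) p (by simp)
      · rw [pvFfIns_len _ _ _ hex]; simpa using hlen
      · intro t ht
        rw [pvFfIns_countP _ _ _ hex t ht, List.countP_append, hcnt t (le_trans hlbp ht)]
        have hnh : (decide (t ≤ h)) = false := by simp; omega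
        simp [List.countP_cons, hnh]
    · -- neither can place p: both append p.2 as a new chain / unmatched departure
      have hexW : ¬ ∃ y ∈ W, y < p.1 := fun h => hex (hkey.2 h)
      have hffi : pvFfIns p.1 p.2 S = S ++ [p.2] :=
        pvFfIns_no _ _ _ (fun x hx hlt => hex ⟨x, hx, hlt⟩)
      have hbqs : pvBqStep W p = W ++ [p.2] := by
        cases W with
        | nil => rfl
        | cons h t' =>
          have : ¬ h < p.1 := fun hh => hexW ⟨h, by simp, hh⟩
          simp [pvBqStep, if_neg this]
      have hff : pvFf S (p :: rest) = pvFf (S ++ [p.2]) rest := by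
        simp [pvFf, hffi]
      have hbq : pvBq W (p :: rest) = pvBq (W ++ [p.2]) rest := by
        simp [pvBq, hbqs]
      rw [hff, hbq]
      refine ih (S ++ [p.2]) (W ++ [p.2]) p.1 hfst' hlb' hsnd' ?_ ?_ ?_ ?_
      · intro y hy q hq
        rcases List.mem_append.1 hy with hy' | hy'
        · exact hWd y hy' q (by simp [hq])
        · simp at hy'; subst hy'; exact hd2 q hq
      · apply List.pairwise_append.2
        refine ⟨hWs, by simp, ?_⟩
        intro y hy z hz
        simp at hz; subst hz
        exact hWd y hy p (by simp)
      · simp [hlen]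
      · intro t ht
        rw [List.countP_append, List.countP_append, hcnt t (le_trans hlbp ht)]

-- ---------- B port's counter loop = the queue model ----------
theorem pvB_loop (A D : List Int) (N : Nat) (hA : A.length = N) (hD : D.length = N) :
    ∀ k, k ≤ N → ∃ μ : Nat, μ ≤ k ∧
      ((List.range k).map (fun j : Nat => (j : Int))).foldl
        (fun (m : Int) i =>
          if m < i ∧ PySem.List.pyGetD D m 0 < PySem.List.pyGetD A i 0 then m + 1 else m) 0
        = (μ : Int) ∧
      pvBq [] ((A.zip D).take k) = (D.drop μ).take (k - μ) := by
  intro k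
  induction k with
  | zero => intro _; exact ⟨0, le_refl _, by simp, by simp [pvBq]⟩
  | succ k ih =>
    intro hk1
    have hk : k ≤ N := Nat.le_of_succ_le hk1
    obtain ⟨μ, hμk, hfold, hW⟩ := ih hk
    have hkA : k < A.length := by omega
    have hkD : k < D.length := by omega
    have hkL : k < (A.zip D).length := by simp [List.length_zip]; omega
    have htake : (A.zip D).take (k+1) = (A.zip D).take k ++ [(A[k], D[k])] := by
      rw [List.take_add_one, List.getElem?_eq_getElem hkL]
      simp [List.getElem_zip]
    have hrange : (List.range (k+1)).map (fun j : Nat => (j : Int)) =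
        (List.range k).map (fun j : Nat => (j : Int)) ++ [(k : Int)] := by
      simp [List.range_succ]
    have hstep : pvBq [] ((A.zip D).take (k+1)) =
        pvBqStep ((D.drop μ).take (k - μ)) (A[k], D[k]) := by
      simp only [pvBq] at hW ⊢
      rw [htake, List.foldl_append, hW, List.foldl_cons, List.foldl_nil]
    have hfold1 : ((List.range (k+1)).map (fun j : Nat => (j : Int))).foldl
        (fun (m : Int) i =>
          if m < i ∧ PySem.List.pyGetD D m 0 < PySem.List.pyGetD A i 0 then m + 1 else m) 0
        = (if (μ : Int) < (k : Int) ∧ PySem.List.pyGetD D (μ : Int) 0 < PySem.List.pyGetD A (k : Int) 0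
           then (μ : Int) + 1 else (μ : Int)) := by
      rw [hrange, List.foldl_append, hfold, List.foldl_cons, List.foldl_nil]
    have hcond : ((μ : Int) < (k : Int) ∧ PySem.List.pyGetD D (μ : Int) 0 < PySem.List.pyGetD A (k : Int) 0)
        ↔ (μ < k ∧ D[μ]'(by omega) < A[k]) := by
      constructor
      · rintro ⟨h1, h2⟩
        have hμk' : μ < k := by exact_mod_cast h1
        rw [PySem.List.pyGetD_natCast, PySem.List.pyGetD_natCast,
          List.getD_eq_getElem _ _ (by omega), List.getD_eq_getElem _ _ (by omega)] at h2
        exact ⟨hμk', h2⟩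
      · rintro ⟨h1, h2⟩
        refine ⟨by exact_mod_cast h1, ?_⟩
        rw [PySem.List.pyGetD_natCast, PySem.List.pyGetD_natCast,
          List.getD_eq_getElem _ _ (by omega), List.getD_eq_getElem _ _ (by omega)]
        exact h2
    by_cases hc : μ < k ∧ D[μ]'(by omega) < A[k]
    · refine ⟨μ + 1, by omega, ?_, ?_⟩
      · rw [hfold1, if_pos (hcond.2 hc)]; push_cast; ring
      · rw [hstep]
        have hdrop : D.drop μ = D[μ]'(by omega) :: D.drop (μ + 1) :=
          List.drop_eq_getElem_cons (by omega)
        rw [hdrop, show k - μ = (k - μ - 1) + 1 by omega, List.take_succ_cons]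
        simp only [pvBqStep]
        rw [if_pos hc.2]
        have hlen2 : k - μ - 1 < (D.drop (μ+1)).length := by simp [List.length_drop]; omega
        have hlast : (D.drop (μ+1))[k - μ - 1]'hlen2 = D[k] := by
          rw [List.getElem_drop]; congr 1; omega
        rw [show k + 1 - (μ + 1) = (k - μ - 1) + 1 by omega, List.take_add_one,
          List.getElem?_eq_getElem hlen2, hlast]
        simp
    · refine ⟨μ, by omega, ?_, ?_⟩
      · rw [hfold1, if_neg (fun h => hc (hcond.1 h))]
      · rw [hstep]
        have hgoal : pvBqStep ((D.drop μ).take (k - μ)) (A[k], D[k]) =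
            (D.drop μ).take (k - μ) ++ [D[k]] := by
          rcases hw : (D.drop μ).take (k - μ) with _ | ⟨h, t⟩
          · simp [pvBqStep]
          · have hne : k - μ ≠ 0 := by
              intro h0; rw [h0] at hw; simp at hw
            have hμk' : μ < k := by omega
            have hdrop : D.drop μ = D[μ]'(by omega) :: D.drop (μ + 1) :=
              List.drop_eq_getElem_cons (by omega)
            have hh : h = D[μ]'(by omega) := by
              rw [hdrop, show k - μ = (k - μ - 1) + 1 by omega, List.take_succ_cons] at hw
              exact (List.cons.injEq _ _ _ _ ▸ hw).1.symm
            have hnlt : ¬ h < A[k] := by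
              rw [hh]; intro hlt; exact hc ⟨hμk', hlt⟩
            simp [pvBqStep, hnlt]
        rw [hgoal]
        have hlen2 : k - μ < (D.drop μ).length := by simp [List.length_drop]; omega
        have hlast : (D.drop μ)[k - μ]'hlen2 = D[k] := by
          rw [List.getElem_drop]; congr 1; omega
        rw [show k + 1 - μ = (k - μ) + 1 by omega, List.take_add_one,
          List.getElem?_eq_getElem hlen2, hlast]
        simp
-- index-level chain run: absorbed indices, remaining indices, given pair table f
def pvAbs (f : Int → Int × Int) (x : Int) : List Int → List Int
  | [] => []
  | j :: js => if x < (f j).1 then j :: pvAbs f (f j).2 js else pvAbs f x js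

def pvRem (f : Int → Int × Int) (x : Int) : List Int → List Int
  | [] => []
  | j :: js => if x < (f j).1 then pvRem f (f j).2 js else j :: pvRem f x js

def pvEnd (f : Int → Int × Int) (x : Int × Int) : List Int → Int × Int
  | [] => x
  | j :: js => if x.2 < (f j).1 then pvEnd f (f j) js else pvEnd f x js

theorem pvAbs_subset (f : Int → Int × Int) (x : Int) (js : List Int) :
    ∀ j ∈ pvAbs f x js, j ∈ js := by
  induction js generalizing x with
  | nil => simp [pvAbs]
  | cons j js ih =>
    simp only [pvAbs]
    split
    · intro a ha
      rcases List.mem_cons.1 ha with rfl | ha'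
      · simp
      · exact List.mem_cons_of_mem _ (ih _ _ ha')
    · intro a ha; exact List.mem_cons_of_mem _ (ih _ _ ha)

theorem pvSkim_map (f : Int → Int × Int) (x : Int) (js : List Int) :
    pvSkim x (js.map f) = (pvRem f x js).map f := by
  induction js generalizing x with
  | nil => rfl
  | cons j js ih =>
    simp only [List.map_cons, pvSkim, pvRem]
    split
    · exact ih _
    · simp [ih x]

theorem pvRem_eq_filter (f : Int → Int × Int) (x : Int) (js : List Int) (h : js.Nodup) :
    js.filter (fun j => !(decide (j ∈ pvAbs f x js))) = pvRem f x js := by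
  induction js generalizing x with
  | nil => rfl
  | cons j js ih =>
    have hj : j ∉ js := (List.nodup_cons.1 h).1
    have hjs : js.Nodup := (List.nodup_cons.1 h).2
    simp only [pvAbs, pvRem]
    split
    · next hx =>
      rw [List.filter_cons]
      have : (!(decide (j ∈ j :: pvAbs f (f j).2 js))) = false := by simp
      rw [this, if_neg (by simp)]
      rw [← ih (f j).2 hjs]
      apply List.filter_congr
      intro a ha
      have : a ≠ j := fun h' => hj (h' ▸ ha)
      simp [this]
    · next hx =>
      rw [List.filter_cons]
      have hjn : j ∉ pvAbs f x js := fun hmem => hj (pvAbs_subset f x js j hmem)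
      have : (!(decide (j ∈ pvAbs f x js))) = true := by simp [hjn]
      rw [this, if_pos (by simp)]
      rw [ih x hjs]

-- dict of marks: getD after inserting true at every index of a list
theorem pv_getD_marks (abs : List Int) (c : PySem.Dict Int Bool) (j : Int) :
    (abs.foldl (fun c i => c.insert i true) c).getD j false =
      (decide (j ∈ abs) || c.getD j false) := by
  induction abs generalizing c with
  | nil => simp
  | cons a abs ih =>
    simp only [List.foldl_cons, ih, PySem.Dict.getD_insert]
    by_cases hja : j = a
    · subst hja; simp
    · simp [hja]

-- the port's inner loop body, with arr-lookups abstracted by f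
def pvInnerBody (f : Int → Int × Int)
    (s : PySem.Dict Int Bool × List (Int × Int) × (Int × Int)) (j : Int) :
    PySem.Dict Int Bool × List (Int × Int) × (Int × Int) :=
  if s.1.getD j false then s
  else if s.2.2.2 < (f j).1 then (s.1.insert j true, s.2.1 ++ [f j], f j)
  else s

def pvOuterBody (f : Int → Int × Int) (n : Int)
    (st : PySem.Dict Int Bool × List (List (Int × Int))) (i : Int) :
    PySem.Dict Int Bool × List (List (Int × Int)) :=
  if st.1.getD i false then st
  else
    let inner := (PySem.List.pyRange (i+1) n).foldl (pvInnerBody f)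
      (st.1.insert i true, [f i], f i)
    (inner.1, st.2 ++ [inner.2.1])

theorem pvInner_run (f : Int → Int × Int) (js : List Int) :
    ∀ (c : PySem.Dict Int Bool) (data : List (Int × Int)) (x : Int × Int), js.Nodup →
    js.foldl (pvInnerBody f) (c, data, x) =
      ((pvAbs f x.2 (js.filter (fun j => !(c.getD j false)))).foldl
          (fun c i => c.insert i true) c,
       data ++ (pvAbs f x.2 (js.filter (fun j => !(c.getD j false)))).map f,
       pvEnd f x (js.filter (fun j => !(c.getD j false)))) := by
  induction js with
  | nil => intro c data x _; simp [pvAbs, pvEnd]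
  | cons j js ih =>
    intro c data x hnd
    have hj : j ∉ js := (List.nodup_cons.1 hnd).1
    have hjs : js.Nodup := (List.nodup_cons.1 hnd).2
    by_cases hm : c.getD j false
    · have hfil : (j :: js).filter (fun j => !(c.getD j false)) =
        js.filter (fun j => !(c.getD j false)) := by
        rw [List.filter_cons, if_neg (by simp [hm])]
      rw [hfil, List.foldl_cons]
      have : pvInnerBody f (c, data, x) j = (c, data, x) := by
        simp [pvInnerBody, hm]
      rw [this, ih c data x hjs]
    · have hfil : (j :: js).filter (fun j => !(c.getD j false)) =
        j :: js.filter (fun j => !(c.getD j false)) := by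
        rw [List.filter_cons, if_pos (by simp [hm])]
      rw [hfil, List.foldl_cons]
      by_cases habs : x.2 < (f j).1
      · have hstep : pvInnerBody f (c, data, x) j = (c.insert j true, data ++ [f j], f j) := by
          simp [pvInnerBody, hm, habs]
        rw [hstep, ih (c.insert j true) (data ++ [f j]) (f j) hjs]
        have hfil2 : js.filter (fun a => !((c.insert j true).getD a false)) =
            js.filter (fun a => !(c.getD a false)) := by
          apply List.filter_congr
          intro a ha
          have : a ≠ j := fun h' => hj (h' ▸ ha)
          rw [PySem.Dict.getD_insert, if_neg this]
        rw [hfil2]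
        have habs2 : pvAbs f x.2 (j :: js.filter (fun j => !(c.getD j false))) =
            j :: pvAbs f (f j).2 (js.filter (fun j => !(c.getD j false))) := by
          simp only [pvAbs]; rw [if_pos habs]
        have hend2 : pvEnd f x (j :: js.filter (fun j => !(c.getD j false))) =
            pvEnd f (f j) (js.filter (fun j => !(c.getD j false))) := by
          simp only [pvEnd]; rw [if_pos habs]
        rw [habs2, hend2]
        simp
      · have hstep : pvInnerBody f (c, data, x) j = (c, data, x) := by
          simp [pvInnerBody, hm, habs]
        rw [hstep, ih c data x hjs]
        have habs2 : pvAbs f x.2 (j :: js.filter (fun j => !(c.getD j false))) =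
            pvAbs f x.2 (js.filter (fun j => !(c.getD j false))) := by
          simp only [pvAbs]; rw [if_neg habs]
        have hend2 : pvEnd f x (j :: js.filter (fun j => !(c.getD j false))) =
            pvEnd f x (js.filter (fun j => !(c.getD j false))) := by
          simp only [pvEnd]; rw [if_neg habs]
        rw [habs2, hend2]

theorem pvOuter_run (f : Int → Int × Int) (n : Int) :
    ∀ (K : Nat) (k : Int) (c : PySem.Dict Int Bool) (res : List (List (Int × Int))),
    (n - k).toNat = K →
    (((PySem.List.pyRange k n).foldl (pvOuterBody f n) (c, res)).2.length : Nat) =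
      res.length + pvChains (((PySem.List.pyRange k n).filter
        (fun j => !(c.getD j false))).map f) := by
  intro K
  induction K with
  | zero =>
    intro k c res h0
    have : PySem.List.pyRange k n = [] := PySem.List.pyRange_one_eq_nil (by omega)
    rw [this]
    simp [pvChains]
  | succ K ih =>
    intro k c res hK
    have hkn : k < n := by omega
    rw [PySem.List.pyRange_one_cons hkn, List.foldl_cons]
    by_cases hm : c.getD k false
    · have : pvOuterBody f n (c, res) k = (c, res) := by simp [pvOuterBody, hm]
      rw [this, ih (k+1) c res (by omega)]
      rw [List.filter_cons, if_neg (by simp [hm])]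
    · have hnd : (PySem.List.pyRange (k+1) n).Nodup := PySem.List.nodup_pyRange_one _ _
      have hkmem : k ∉ PySem.List.pyRange (k+1) n := by
        rw [PySem.List.mem_pyRange_one]; omega
      -- the inner pass on the unmarked indices after k
      set us := (PySem.List.pyRange (k+1) n).filter (fun j => !(c.getD j false)) with hus
      have husnd : us.Nodup := List.Nodup.filter _ hnd
      set abs := pvAbs f (f k).2 us with habs
      have hfil1 : (PySem.List.pyRange (k+1) n).filter
          (fun a => !((c.insert k true).getD a false)) = us := by
        rw [hus]
        apply List.filter_congr
        intro a ha
        have : a ≠ k := fun h' => hkmem (h' ▸ ha)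
        rw [PySem.Dict.getD_insert, if_neg this]
      have hstep : pvOuterBody f n (c, res) k =
          ((abs.foldl (fun c i => c.insert i true) (c.insert k true)),
           res ++ [[f k] ++ abs.map f]) := by
        simp only [pvOuterBody, hm, Bool.false_eq_true, if_false]
        rw [pvInner_run f _ _ _ _ hnd, hfil1]
      rw [hstep]
      set c' := abs.foldl (fun c i => c.insert i true) (c.insert k true) with hc'
      rw [ih (k+1) c' _ (by omega)]
      -- identify the unmarked indices after this pass
      have hfil2 : (PySem.List.pyRange (k+1) n).filter (fun j => !(c'.getD j false)) =
          pvRem f (f k).2 us := by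
        rw [← pvRem_eq_filter f (f k).2 us husnd]
        have h1 : ∀ j ∈ PySem.List.pyRange (k+1) n,
            (!(c'.getD j false)) = ((!(decide (j ∈ abs))) && (!(c.getD j false))) := by
          intro j hjr
          have hjk : j ≠ k := fun h' => hkmem (h' ▸ hjr)
          rw [hc', pv_getD_marks, PySem.Dict.getD_insert, if_neg hjk]
          simp [Bool.not_or]
        rw [List.filter_congr h1, ← List.filter_filter]
      rw [hfil2]
      -- and compute pvChains on the left-over list with head k
      have hfil3 : (k :: PySem.List.pyRange (k+1) n).filter (fun j => !(c.getD j false)) =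
          k :: us := by
        rw [List.filter_cons, if_pos (by simp [hm])]
      rw [hfil3, List.map_cons]
      rw [show pvChains (f k :: us.map f) = 1 + pvChains (pvSkim (f k).2 (us.map f)) by
        simp only [pvChains]]
      rw [pvSkim_map]
      simp only [List.length_append, List.length_cons, List.length_nil]
      omega

-- chains = queue length, for pairs with both coordinates nondecreasing
theorem pvChains_eq_bq (l : List (Int × Int))
    (h1 : (l.map Prod.fst).Pairwise (· ≤ ·)) (h2 : (l.map Prod.snd).Pairwise (· ≤ ·)) :
    pvChains l = (pvBq [] l).length := by
  rw [pvChains_eq_ff]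
  cases l with
  | nil => simp [pvFf, pvBq]
  | cons p rest =>
    apply pvFfBq (p :: rest) [] [] p.1 h1 ?_ h2
      (by intro y hy; simp at hy) List.Pairwise.nil rfl (fun t _ => rfl)
    intro q hq
    rcases List.mem_cons.1 hq with rfl | hq'
    · exact le_refl _
    · exact (List.pairwise_cons.1 h1).1 q.1 (List.mem_map_of_mem hq')

-- the whole equivalence, on already-sorted lists a' d' (with the ports' loop shapes)
theorem pvMain (a' d' : List Int) (n : Int) (hn : 0 < n)
    (hNa : n.toNat ≤ a'.length) (hNd : n.toNat ≤ d'.length)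
    (hsa : a'.Pairwise (· ≤ ·)) (hsd : d'.Pairwise (· ≤ ·)) :
    ((((PySem.List.pyRange 0 n).foldl
        (pvOuterBody (fun j => PySem.List.pyGetD
          ((PySem.List.pyRange 0 n).map
            (fun i => (PySem.List.pyGetD a' i 0, PySem.List.pyGetD d' i 0))) j (0, 0)) n)
        (PySem.Dict.empty, [])).2.length : Nat) : Int)
    = n - ((PySem.List.pyRange 0 n).foldl
        (fun (m : Int) i =>
          if m < i ∧ PySem.List.pyGetD (d'.take n.toNat) m 0 < PySem.List.pyGetD (a'.take n.toNat) i 0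
          then m + 1 else m) 0) := by
  have hNn : ((n.toNat : Int)) = n := Int.toNat_of_nonneg (by omega)
  have hAl : (a'.take n.toNat).length = n.toNat := by rw [List.length_take]; omega
  have hDl : (d'.take n.toNat).length = n.toNat := by rw [List.length_take]; omega
  have hLl : ((a'.take n.toNat).zip (d'.take n.toNat)).length = n.toNat := by
    rw [List.length_zip]; omega
  -- the pair table over the index range is the zip of the two prefix lists
  have hmapL : (PySem.List.pyRange 0 n).map
      (fun i => (PySem.List.pyGetD a' i 0, PySem.List.pyGetD d' i 0)) =
      (a'.take n.toNat).zip (d'.take n.toNat) := by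
    apply List.ext_getElem
    · rw [List.length_map, PySem.List.length_pyRange_one, hLl]; omega
    · intro i h1 h2
      rw [List.length_map, PySem.List.length_pyRange_one] at h1
      have hiN : i < n.toNat := by omega
      rw [List.getElem_map, PySem.List.getElem_pyRange_one, zero_add,
        PySem.List.pyGetD_natCast, PySem.List.pyGetD_natCast,
        List.getD_eq_getElem _ _ (by omega), List.getD_eq_getElem _ _ (by omega),
        List.getElem_zip]
      congr 1 <;> rw [List.getElem_take]
  obtain ⟨μ, hμN, hfoldμ, hWμ⟩ :=
    pvB_loop (a'.take n.toNat) (d'.take n.toNat) n.toNat hAl hDl n.toNat (le_refl _)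
  have htakeL : ((a'.take n.toNat).zip (d'.take n.toNat)).take n.toNat =
      (a'.take n.toNat).zip (d'.take n.toNat) := List.take_of_length_le (le_of_eq hLl)
  rw [htakeL] at hWμ
  have hbqlen : (pvBq [] ((a'.take n.toNat).zip (d'.take n.toNat))).length = n.toNat - μ := by
    rw [hWμ, List.length_take, List.length_drop]
    omega
  -- sortedness transfers to the zipped prefixes
  have hmfst : ((a'.take n.toNat).zip (d'.take n.toNat)).map Prod.fst = a'.take n.toNat :=
    List.map_fst_zip (le_of_eq (hAl.trans hDl.symm))
  have hmsnd : ((a'.take n.toNat).zip (d'.take n.toNat)).map Prod.snd = d'.take n.toNat :=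
    List.map_snd_zip (le_of_eq (hDl.trans hAl.symm))
  have hchains : pvChains ((a'.take n.toNat).zip (d'.take n.toNat)) = n.toNat - μ := by
    rw [pvChains_eq_bq _ (by rw [hmfst]; exact List.Pairwise.sublist (List.take_sublist _ _) hsa)
      (by rw [hmsnd]; exact List.Pairwise.sublist (List.take_sublist _ _) hsd), hbqlen]
  -- the A side: run the dict simulation
  rw [pvOuter_run _ n n.toNat 0 PySem.Dict.empty [] (by omega)]
  have hfiltrue : (PySem.List.pyRange 0 n).filter
      (fun j => !((PySem.Dict.empty : PySem.Dict Int Bool).getD j false)) =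
      PySem.List.pyRange 0 n := by
    rw [List.filter_congr (q := fun _ => true) (by intro j _; rfl), List.filter_true]
  rw [hfiltrue]
  have hmapg : (PySem.List.pyRange 0 n).map
      (fun j => PySem.List.pyGetD
        ((PySem.List.pyRange 0 n).map
          (fun i => (PySem.List.pyGetD a' i 0, PySem.List.pyGetD d' i 0))) j (0, 0)) =
      (a'.take n.toNat).zip (d'.take n.toNat) := by
    rw [← hmapL]
    apply List.map_congr_left
    intro j hj
    rw [PySem.List.mem_pyRange_one] at hj
    exact PySem.List.pyGetD_map_pyRange_of_nonneg _ n j (0, 0) hj.1 hj.2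
  rw [hmapg, hchains]
  -- the B side: rewrite the loop via the counter characterization
  rw [PySem.List.pyRange_zero]
  rw [hfoldμ]
  simp only [List.length_nil, Nat.zero_add]
  omega

-- ===== VERDICT =====
theorem minimum_number_of_platforms_spec : Claim_equal_minimum_number_of_platforms := by
  intro arrival deps n _hDom hPre
  unfold Spec_minimum_number_of_platforms
  by_cases hn : n ≤ 0
  · simp [minimum_number_of_platforms, minimum_number_of_platforms_alt,
      PySem.List.pyRange_one_eq_nil hn, hn]
  · replace hn : 0 < n := by omega
    have hPre' : n ≤ (arrival.length : Int) ∧ n ≤ (deps.length : Int) := by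
      rcases hPre with h | h
      · omega
      · exact h
    have hApick : minimum_number_of_platforms arrival deps n =
        ((((PySem.List.pyRange 0 n).foldl
          (pvOuterBody (fun j => PySem.List.pyGetD
            ((PySem.List.pyRange 0 n).map
              (fun i => (PySem.List.pyGetD (PySem.List.sorted arrival (fun x => x) false) i 0,
                         PySem.List.pyGetD (PySem.List.sorted deps (fun x => x) false) i 0))) j (0, 0)) n)
          (PySem.Dict.empty, [])).2.length : Nat) : Int) := rfl
    have hBpick : minimum_number_of_platforms_alt arrival deps n =
        n - ((PySem.List.pyRange 0 n).foldl
          (fun (m : Int) i =>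
            if m < i ∧ PySem.List.pyGetD ((PySem.List.sorted deps (fun x => x) false).take n.toNat) m 0
                < PySem.List.pyGetD ((PySem.List.sorted arrival (fun x => x) false).take n.toNat) i 0
            then m + 1 else m) 0) := by
      show (if n ≤ 0 then (0:Int) else _) = _
      rw [if_neg (by omega)]
      rw [PySem.List.slice_to _ (by omega : (0:Int) ≤ n),
        PySem.List.slice_to _ (by omega : (0:Int) ≤ n)]
    rw [hApick, hBpick]
    apply pvMain
    · exact hn
    · rw [PySem.List.length_sorted]; omega
    · rw [PySem.List.length_sorted]; omega
    · simpa using PySem.List.sorted_pairwise arrival (fun x => x)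
    · simpa using PySem.List.sorted_pairwise deps (fun x => x)
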